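-- pv_equiv track=rewrite | github.com/m33x/MaxBib | validate.py | get_bibitem
-- ===== SOURCE A (Python) =====
-- def get_bibitem(bib, item_type):
--     results = []
--     item = ''
--     for line in bib:
--         item += line + '\n'
--         if line.startswith(item_type):
--             item = line + '\n'
--         if line.startswith('}'):
--             results.append([item])
--             item = ''
--     return results
-- ===== SOURCE B (Python) =====
-- def get_bibitem(bib, item_type):
--     # Pass 1: partition the lines into closed blocks, each ending at a line
--     # that starts with '}'.  Lines after the last '}' form no block.
--     blocks = []
--     cur = []
--     for line in bib:
--         cur.append(line)
--         if line.startswith('}'):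
--             blocks.append(cur)
--             cur = []
--     # Pass 2: for each closed block, the item starts at the LAST line that
--     # starts with item_type (or at the block start if there is none).
--     results = []
--     for block in blocks:
--         start = 0
--         for i, line in enumerate(block):
--             if line.startswith(item_type):
--                 start = i
--         results.append([''.join(line + '\n' for line in block[start:])])
--     return results
-- ===== Notes on version B (the rewrite author's own statement) =====
-- stated objective: alternative
-- what changed: Replaces the single-pass reset-accumulator state machine by a two-pass block-partition: lines are first grouped into '}'-terminated blocks, then each block is scanned for the last line starting with item_type and joined from there.
import Mathlib
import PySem

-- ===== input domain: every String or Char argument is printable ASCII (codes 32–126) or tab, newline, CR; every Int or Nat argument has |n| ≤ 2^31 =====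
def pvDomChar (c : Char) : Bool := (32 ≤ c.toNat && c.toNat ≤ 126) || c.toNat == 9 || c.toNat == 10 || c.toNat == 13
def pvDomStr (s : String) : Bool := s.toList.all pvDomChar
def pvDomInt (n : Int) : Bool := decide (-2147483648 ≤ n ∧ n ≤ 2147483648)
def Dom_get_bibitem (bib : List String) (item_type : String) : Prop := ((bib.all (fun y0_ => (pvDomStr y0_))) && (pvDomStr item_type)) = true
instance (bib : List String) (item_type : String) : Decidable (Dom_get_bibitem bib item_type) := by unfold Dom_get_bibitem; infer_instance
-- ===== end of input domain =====

-- B replaces A's reset-accumulator state machine by a two-pass block-partition with a per-block scan (alternative decomposition, same cost).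


-- ===== PORT A =====
-- loop body of A (state = (results, item))
def pvAStep (item_type : String) (st : List (List String) × String) (line : String) :
    List (List String) × String :=
  let item := st.2 ++ line ++ "\n"
  let item := if PySem.Str.startswith line item_type then line ++ "\n" else item
  if PySem.Str.startswith line "}" then (st.1 ++ [[item]], "") else (st.1, item)

def get_bibitem (bib : List String) (item_type : String) : List (List String) :=
  (bib.foldl (pvAStep item_type) ([], "")).1

-- ===== PORT B =====
-- pass 1 loop body of B (state = (blocks, cur))
def pvBStep (st : List (List String) × List String) (line : String) :
    List (List String) × List String :=
  let cur := st.2 ++ [line]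
  if PySem.Str.startswith line "}" then (st.1 ++ [cur], []) else (st.1, cur)

def pvBlocks (bib : List String) : List (List String) :=
  (bib.foldl pvBStep ([], [])).1

-- pass 2 body of B: last index whose line starts with item_type, join from there
def pvItemOfBlock (item_type : String) (block : List String) : String :=
  let start : Int :=
    (PySem.List.enumerate block 0).foldl
      (fun s p => if PySem.Str.startswith p.2 item_type then p.1 else s) 0
  PySem.Str.join "" ((PySem.List.slice block (some start) none).map (fun line => line ++ "\n"))

def get_bibitem_alt (bib : List String) (item_type : String) : List (List String) :=
  (pvBlocks bib).foldl (fun results block => results ++ [[pvItemOfBlock item_type block]]) []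

-- ===== PRECONDITION & SPEC =====
def Spec_get_bibitem (bib : List String) (item_type : String) (out : List (List String)) : Prop := out = get_bibitem_alt bib item_type
instance (bib : List String) (item_type : String) (out : List (List String)) : Decidable (Spec_get_bibitem bib item_type out) := by unfold Spec_get_bibitem; infer_instance

-- ===== CLAIM (what is proved, stated in full; the proofs are below) =====
def Claim_equal_get_bibitem : Prop := ∀ (bib : List String) (item_type : String), Dom_get_bibitem bib item_type → Spec_get_bibitem bib item_type (get_bibitem bib item_type)

-- ===== LEMMAS AND PROOFS =====

-- A's accumulator value as a function of the lines seen since the last closed block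
def pvItemOf (item_type : String) (cur : List String) : String :=
  cur.foldl (fun acc l => if PySem.Str.startswith l item_type then l ++ "\n" else acc ++ l ++ "\n") ""

-- B's per-block start index
def pvStart (item_type : String) (block : List String) : Int :=
  (PySem.List.enumerate block 0).foldl
    (fun s p => if PySem.Str.startswith p.2 item_type then p.1 else s) 0

theorem pvItemOfBlock_def (item_type : String) (block : List String) :
    pvItemOfBlock item_type block
      = PySem.Str.join "" ((PySem.List.slice block (some (pvStart item_type block)) none).map
          (fun line => line ++ "\n")) := rfl

theorem pvStart_append (item_type : String) (block : List String) (l : String) :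
    pvStart item_type (block ++ [l])
      = if PySem.Str.startswith l item_type then (block.length : Int) else pvStart item_type block := by
  simp [pvStart, PySem.List.enumerate_append, PySem.List.enumerate_cons, PySem.List.enumerate_nil]

theorem pvStart_bounds (item_type : String) (block : List String) :
    0 ≤ pvStart item_type block ∧ pvStart item_type block ≤ (block.length : Int) := by
  induction block using List.reverseRecOn with
  | nil => simp [pvStart, PySem.List.enumerate_nil]
  | append_singleton block l ih =>
    rw [pvStart_append]
    by_cases h : PySem.Str.startswith l item_type = true
    · rw [if_pos h]; simp
    · rw [if_neg h]
      refine ⟨ih.1, ?_⟩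
      have := ih.2
      simp only [List.length_append, List.length_cons, List.length_nil]
      omega

theorem pvCharsJoin_empty_append (cs : List (List Char)) (x : List Char) :
    PySem.Chars.join [] (cs ++ [x]) = PySem.Chars.join [] cs ++ x := by
  induction cs with
  | nil => simp [PySem.Chars.join_singleton, PySem.Chars.join_nil]
  | cons a rest ih =>
    cases rest with
    | nil =>
      simp [PySem.Chars.join_cons_cons, PySem.Chars.join_singleton]
    | cons b t =>
      simp only [List.cons_append, PySem.Chars.join_cons_cons]
      rw [List.cons_append] at ih
      rw [ih]
      simp [List.append_assoc]

theorem pvJoin_empty_append (xs : List String) (x : String) :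
    PySem.Str.join "" (xs ++ [x]) = PySem.Str.join "" xs ++ x := by
  apply String.toList_injective
  simp only [PySem.Str.toList_join, String.toList_append, PySem.Str.toList_join, List.map_append,
    List.map_cons, List.map_nil]
  exact pvCharsJoin_empty_append (xs.map String.toList) x.toList

theorem pvJoin_empty_singleton (x : String) : PySem.Str.join "" [x] = x := by
  apply String.toList_injective
  simp [PySem.Str.toList_join, PySem.Chars.join_singleton]

theorem pvItemOfBlock_append (item_type : String) (block : List String) (l : String) :
    pvItemOfBlock item_type (block ++ [l])
      = if PySem.Str.startswith l item_type then l ++ "\n"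
        else pvItemOfBlock item_type block ++ (l ++ "\n") := by
  have hb := pvStart_bounds item_type block
  rw [pvItemOfBlock_def, pvItemOfBlock_def, pvStart_append]
  by_cases h : PySem.Str.startswith l item_type = true
  · rw [if_pos h, if_pos h]
    rw [PySem.List.slice_from _ (by positivity)]
    simp only [Int.toNat_natCast, List.drop_append_of_le_length (le_refl block.length),
      List.drop_length, List.nil_append, List.map_cons, List.map_nil]
    exact pvJoin_empty_singleton _
  · rw [if_neg h, if_neg h]
    rw [PySem.List.slice_from _ hb.1, PySem.List.slice_from _ hb.1]
    have hle : (pvStart item_type block).toNat ≤ block.length := by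
      have := hb.2; have := hb.1; omega
    rw [List.drop_append_of_le_length hle, List.map_append, List.map_singleton,
      pvJoin_empty_append]

theorem pvItemOf_append (item_type : String) (cur : List String) (l : String) :
    pvItemOf item_type (cur ++ [l])
      = if PySem.Str.startswith l item_type then l ++ "\n"
        else pvItemOf item_type cur ++ l ++ "\n" := by
  simp [pvItemOf, List.foldl_append]

theorem pvItemOfBlock_eq (item_type : String) (block : List String) :
    pvItemOfBlock item_type block = pvItemOf item_type block := by
  induction block using List.reverseRecOn with
  | nil =>
    rw [pvItemOfBlock_def]
    rw [PySem.List.slice_from _ (by simp [pvStart, PySem.List.enumerate_nil] : (0:Int) ≤ _)]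
    simp [pvItemOf]
    rfl
  | append_singleton block l ih =>
    rw [pvItemOfBlock_append, pvItemOf_append, ih]
    split_ifs with h
    · rfl
    · rw [String.append_assoc]

theorem pvBlocks_prefix (bib : List String) :
    ∀ (bs : List (List String)) (cur : List String),
      (bib.foldl pvBStep (bs, cur)).1 = bs ++ (bib.foldl pvBStep ([], cur)).1 := by
  induction bib with
  | nil => intro bs cur; simp
  | cons line rest ih =>
    intro bs cur
    simp only [List.foldl_cons, pvBStep]
    by_cases h : PySem.Str.startswith line "}" = true
    · rw [if_pos h, if_pos h]
      rw [ih (bs ++ [cur ++ [line]]), ih ([] ++ [cur ++ [line]])]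
      simp
    · rw [if_neg h, if_neg h]
      exact ih bs (cur ++ [line])

theorem pvMain (item_type : String) (bib : List String) :
    ∀ (r : List (List String)) (cur : List String),
      (bib.foldl (pvAStep item_type) (r, pvItemOf item_type cur)).1
        = r ++ ((bib.foldl pvBStep ([], cur)).1).map (fun b => [pvItemOf item_type b]) := by
  induction bib with
  | nil => intro r cur; simp
  | cons line rest ih =>
    intro r cur
    have hitem :
        (if PySem.Str.startswith line item_type then line ++ "\n"
         else pvItemOf item_type cur ++ line ++ "\n") = pvItemOf item_type (cur ++ [line]) :=
      (pvItemOf_append item_type cur line).symm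
    simp only [List.foldl_cons, pvAStep, pvBStep]
    by_cases h : PySem.Str.startswith line "}" = true
    · rw [if_pos h, if_pos h]
      simp only [hitem]
      have h0 : ("" : String) = pvItemOf item_type [] := rfl
      rw [h0, ih (r ++ [[pvItemOf item_type (cur ++ [line])]]) []]
      have hp := pvBlocks_prefix rest [cur ++ [line]] []
      simp only [List.nil_append]
      rw [hp]
      simp [List.append_assoc]
    · rw [if_neg h, if_neg h]
      simp only [hitem]
      exact ih r (cur ++ [line])

-- ===== VERDICT (by name: the statement is the Claim_ definition above) =====
theorem get_bibitem_spec : Claim_equal_get_bibitem := by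
  intro bib item_type _
  show get_bibitem bib item_type = get_bibitem_alt bib item_type
  have hA : get_bibitem bib item_type
      = (bib.foldl (pvAStep item_type) ([], pvItemOf item_type []) ).1 := rfl
  have hB : get_bibitem_alt bib item_type
      = [] ++ (pvBlocks bib).map (fun b => [pvItemOfBlock item_type b]) := by
    unfold get_bibitem_alt
    exact PySem.List.foldl_append_singleton_eq_map _ _ _
  rw [hA, pvMain item_type bib [] [], hB]
  simp only [pvBlocks, List.nil_append]
  exact (List.map_congr_left (fun b _ => by rw [pvItemOfBlock_eq])).symm
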